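-- pv_equiv track=rewrite | github.com/tessyjonburica/Group-33 | SurveyAnalyzer/pattern_detector.py | _are_responses_related
-- ===== SOURCE A (Python) =====
-- def _are_responses_related(response1: str, response2: str) -> bool:
--     """Check if two responses are related (simplified logic)."""
--     # This is a simplified correlation check
--     # In a real implementation, you might use more sophisticated methods
--
--     # Check for similar sentiment
--     positive_words = ['good', 'great', 'excellent', 'satisfied', 'happy', 'like', 'love']
--     negative_words = ['bad', 'poor', 'terrible', 'dissatisfied', 'unhappy', 'dislike', 'hate']
--
--     response1_lower = response1.lower()
--     response2_lower = response2.lower()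
--
--     # Check if both responses have similar sentiment
--     response1_positive = any(word in response1_lower for word in positive_words)
--     response1_negative = any(word in response1_lower for word in negative_words)
--     response2_positive = any(word in response2_lower for word in positive_words)
--     response2_negative = any(word in response2_lower for word in negative_words)
--
--     if response1_positive and response2_positive:
--         return True
--     if response1_negative and response2_negative:
--         return True
--
--     # Check for exact matches
--     if response1_lower == response2_lower:
--         return True
--
--     return False
-- ===== SOURCE B (Python) =====
-- # Sentiment keywords indexed by their first character, so a single left-to-right
-- # pass over each response can test only the few candidate words at each position.
-- _WORDS_BY_FIRST = {
--     'g': [('good', True), ('great', True)],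
--     'e': [('excellent', True)],
--     's': [('satisfied', True)],
--     'h': [('happy', True), ('hate', False)],
--     'l': [('like', True), ('love', True)],
--     'b': [('bad', False)],
--     'p': [('poor', False)],
--     't': [('terrible', False)],
--     'd': [('dissatisfied', False), ('dislike', False)],
--     'u': [('unhappy', False)],
-- }
--
--
-- def _scan_sentiment(text):
--     """One pass over text: at each position try only words starting with that char."""
--     has_pos = False
--     has_neg = False
--     for i, ch in enumerate(text):
--         for word, is_pos in _WORDS_BY_FIRST.get(ch, []):
--             if text.startswith(word, i):
--                 has_pos = has_pos or is_pos
--                 has_neg = has_neg or (not is_pos)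
--     return has_pos, has_neg
--
--
-- def _are_responses_related(response1: str, response2: str) -> bool:
--     r1 = response1.lower()
--     r2 = response2.lower()
--     p1, n1 = _scan_sentiment(r1)
--     p2, n2 = _scan_sentiment(r2)
--     return (p1 and p2) or (n1 and n2) or r1 == r2
-- ===== Notes on version B (the rewrite author's own statement) =====
-- stated objective: alternative
-- what changed: Replaces A's fourteen independent 'word in text' substring searches with a single left-to-right multi-pattern scan per response that, at each position, consults a dict of keywords indexed by first character and tests only those as prefixes, accumulating pos/neg flags in one pass.
import Mathlib
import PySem

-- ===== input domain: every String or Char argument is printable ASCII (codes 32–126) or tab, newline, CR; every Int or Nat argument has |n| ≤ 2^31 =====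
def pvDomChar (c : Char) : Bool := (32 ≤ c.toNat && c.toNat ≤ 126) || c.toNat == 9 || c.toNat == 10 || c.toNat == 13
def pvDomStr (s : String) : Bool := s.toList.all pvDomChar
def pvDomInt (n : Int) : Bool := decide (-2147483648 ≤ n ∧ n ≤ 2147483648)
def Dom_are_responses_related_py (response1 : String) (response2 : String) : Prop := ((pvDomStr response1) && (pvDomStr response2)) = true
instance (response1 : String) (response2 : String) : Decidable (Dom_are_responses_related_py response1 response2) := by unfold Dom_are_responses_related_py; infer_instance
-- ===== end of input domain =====

-- B replaces A's fourteen independent substring searches with one left-to-right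
-- multi-pattern scan per response using a first-character index (alternative algorithm).

-- ===== PORT A =====
def pvPositiveWords : List String :=
  ["good", "great", "excellent", "satisfied", "happy", "like", "love"]
def pvNegativeWords : List String :=
  ["bad", "poor", "terrible", "dissatisfied", "unhappy", "dislike", "hate"]

def are_responses_related_py (response1 : String) (response2 : String) : Bool :=
  let response1_lower := PySem.Str.lower response1
  let response2_lower := PySem.Str.lower response2
  let response1_positive := pvPositiveWords.any (fun word => PySem.Str.isIn word response1_lower)
  let response1_negative := pvNegativeWords.any (fun word => PySem.Str.isIn word response1_lower)
  let response2_positive := pvPositiveWords.any (fun word => PySem.Str.isIn word response2_lower)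
  let response2_negative := pvNegativeWords.any (fun word => PySem.Str.isIn word response2_lower)
  if response1_positive && response2_positive then true
  else if response1_negative && response2_negative then true
  else if response1_lower == response2_lower then true
  else false

-- ===== PORT B =====
def pvWordsByFirst : PySem.Dict Char (List (String × Bool)) :=
  PySem.Dict.ofList
    [('g', [("good", true), ("great", true)]),
     ('e', [("excellent", true)]),
     ('s', [("satisfied", true)]),
     ('h', [("happy", true), ("hate", false)]),
     ('l', [("like", true), ("love", true)]),
     ('b', [("bad", false)]),
     ('p', [("poor", false)]),
     ('t', [("terrible", false)]),
     ('d', [("dissatisfied", false), ("dislike", false)]),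
     ('u', [("unhappy", false)])]

-- one pass over the text: at position i (suffix c :: rest) try only the words whose
-- first character is c; text.startswith(word, i) is Chars.startswith on the suffix
def pvScanSent : List Char → Bool × Bool → Bool × Bool
  | [], st => st
  | c :: rest, st =>
      pvScanSent rest
        ((pvWordsByFirst.getD c []).foldl
          (fun st wb =>
            if PySem.Chars.startswith (c :: rest) wb.1.toList then
              (st.1 || wb.2, st.2 || !wb.2)
            else st) st)

def are_responses_related_py_alt (response1 : String) (response2 : String) : Bool :=
  let r1 := PySem.Str.lower response1
  let r2 := PySem.Str.lower response2
  let s1 := pvScanSent r1.toList (false, false)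
  let s2 := pvScanSent r2.toList (false, false)
  (s1.1 && s2.1) || (s1.2 && s2.2) || (r1 == r2)

-- ===== PRECONDITION & SPEC =====
def Spec_are_responses_related_py (response1 : String) (response2 : String) (out : Bool) : Prop := out = are_responses_related_py_alt response1 response2
instance (response1 : String) (response2 : String) (out : Bool) : Decidable (Spec_are_responses_related_py response1 response2 out) := by unfold Spec_are_responses_related_py; infer_instance

-- ===== CLAIM (what is proved, stated in full; the proofs are below) =====
def Claim_equal_are_responses_related_py : Prop := ∀ (response1 : String) (response2 : String), Dom_are_responses_related_py response1 response2 → Spec_are_responses_related_py response1 response2 (are_responses_related_py response1 response2)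

-- ===== LEMMAS AND PROOFS =====

lemma tl_good : "good".toList = ['g', 'o', 'o', 'd'] := by decide
lemma tl_great : "great".toList = ['g', 'r', 'e', 'a', 't'] := by decide
lemma tl_excellent : "excellent".toList = ['e', 'x', 'c', 'e', 'l', 'l', 'e', 'n', 't'] := by decide
lemma tl_satisfied : "satisfied".toList = ['s', 'a', 't', 'i', 's', 'f', 'i', 'e', 'd'] := by decide
lemma tl_happy : "happy".toList = ['h', 'a', 'p', 'p', 'y'] := by decide
lemma tl_like : "like".toList = ['l', 'i', 'k', 'e'] := by decide
lemma tl_love : "love".toList = ['l', 'o', 'v', 'e'] := by decide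
lemma tl_bad : "bad".toList = ['b', 'a', 'd'] := by decide
lemma tl_poor : "poor".toList = ['p', 'o', 'o', 'r'] := by decide
lemma tl_terrible : "terrible".toList = ['t', 'e', 'r', 'r', 'i', 'b', 'l', 'e'] := by decide
lemma tl_dissatisfied : "dissatisfied".toList = ['d', 'i', 's', 's', 'a', 't', 'i', 's', 'f', 'i', 'e', 'd'] := by decide
lemma tl_unhappy : "unhappy".toList = ['u', 'n', 'h', 'a', 'p', 'p', 'y'] := by decide
lemma tl_dislike : "dislike".toList = ['d', 'i', 's', 'l', 'i', 'k', 'e'] := by decide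
lemma tl_hate : "hate".toList = ['h', 'a', 't', 'e'] := by decide

lemma sw_cons (c d : Char) (s p : List Char) :
    PySem.Chars.startswith (c :: s) (d :: p) = (d == c && PySem.Chars.startswith s p) := by
  rw [Bool.eq_iff_iff]
  simp only [Bool.and_eq_true, beq_iff_eq, PySem.Chars.startswith_iff, List.cons_prefix_cons]

lemma isIn_cons (w : List Char) (c : Char) (rest : List Char) :
    PySem.Chars.isIn w (c :: rest) =
      (PySem.Chars.startswith (c :: rest) w || PySem.Chars.isIn w rest) := by
  rw [Bool.eq_iff_iff]
  simp only [Bool.or_eq_true, PySem.Chars.isIn_iff_infix, PySem.Chars.startswith_iff,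
    List.infix_cons_iff]

lemma any_or {α : Type} (l : List α) (f g : α → Bool) :
    (l.any fun x => f x || g x) = (l.any f || l.any g) := by
  induction l with
  | nil => simp
  | cons a t ih => cases h : f a <;> simp [List.any_cons, ih, h, Bool.or_left_comm]

-- the inner loop over the first-character bucket equals one step of A's any-scans
set_option maxHeartbeats 2000000 in
lemma step_eq (c : Char) (rest : List Char) (st : Bool × Bool) :
    ((pvWordsByFirst.getD c []).foldl
        (fun st wb =>
          if PySem.Chars.startswith (c :: rest) wb.1.toList then
            (st.1 || wb.2, st.2 || !wb.2)
          else st) st) =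
      (st.1 || pvPositiveWords.any (fun w => PySem.Chars.startswith (c :: rest) w.toList),
       st.2 || pvNegativeWords.any (fun w => PySem.Chars.startswith (c :: rest) w.toList)) := by
  have hmk : pvWordsByFirst = PySem.Dict.mk
      [('g', [("good", true), ("great", true)]), ('e', [("excellent", true)]),
       ('s', [("satisfied", true)]), ('h', [("happy", true), ("hate", false)]),
       ('l', [("like", true), ("love", true)]), ('b', [("bad", false)]),
       ('p', [("poor", false)]), ('t', [("terrible", false)]),
       ('d', [("dissatisfied", false), ("dislike", false)]), ('u', [("unhappy", false)])] := by
    decide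
  simp only [hmk, PySem.Dict.getD, PySem.Dict.get?_mk_cons]
  split_ifs <;>
    simp_all [tl_good, tl_great, tl_excellent, tl_satisfied, tl_happy, tl_like, tl_love, tl_bad, tl_poor, tl_terrible, tl_dissatisfied, tl_unhappy, tl_dislike, tl_hate, sw_cons, pvPositiveWords, pvNegativeWords, List.any, List.foldl] <;>
    (try (split_ifs <;> simp_all))
  all_goals try subst_vars
  all_goals try simp_all
  all_goals (rw [Prod.ext_iff]; constructor <;> (rw [Bool.eq_iff_iff]; simp_all; try tauto))

lemma scan_spec (s : List Char) (st : Bool × Bool) :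
    pvScanSent s st =
      (st.1 || pvPositiveWords.any (fun w => PySem.Chars.isIn w.toList s),
       st.2 || pvNegativeWords.any (fun w => PySem.Chars.isIn w.toList s)) := by
  induction s generalizing st with
  | nil =>
      have h1 : pvPositiveWords.any (fun w => PySem.Chars.isIn w.toList []) = false := by decide
      have h2 : pvNegativeWords.any (fun w => PySem.Chars.isIn w.toList []) = false := by decide
      simp [pvScanSent, h1, h2]
  | cons c rest ih =>
      have hpos : pvPositiveWords.any (fun w => PySem.Chars.isIn w.toList (c :: rest)) =
          (pvPositiveWords.any (fun w => PySem.Chars.startswith (c :: rest) w.toList) ||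
           pvPositiveWords.any (fun w => PySem.Chars.isIn w.toList rest)) := by
        simp only [isIn_cons]; exact any_or _ _ _
      have hneg : pvNegativeWords.any (fun w => PySem.Chars.isIn w.toList (c :: rest)) =
          (pvNegativeWords.any (fun w => PySem.Chars.startswith (c :: rest) w.toList) ||
           pvNegativeWords.any (fun w => PySem.Chars.isIn w.toList rest)) := by
        simp only [isIn_cons]; exact any_or _ _ _
      rw [pvScanSent, step_eq, ih, hpos, hneg]
      simp [Bool.or_assoc]

-- ===== VERDICT (by name: the statement is the Claim_ definition above) =====
theorem are_responses_related_py_spec : Claim_equal_are_responses_related_py := by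
  intro response1 response2 _
  unfold Spec_are_responses_related_py are_responses_related_py are_responses_related_py_alt
  dsimp only
  rw [scan_spec, scan_spec]
  simp only [PySem.Str.isIn_eq, Bool.false_or]
  split_ifs with h1 h2 h3
  · simp only [h1, Bool.true_or]
  · rw [Bool.not_eq_true] at h1
    simp only [h1, h2, Bool.false_or, Bool.true_or]
  · rw [Bool.not_eq_true] at h1 h2
    simp only [h1, h2, h3, Bool.false_or, Bool.or_true]
  · rw [Bool.not_eq_true] at h1 h2 h3
    simp only [h1, h2, h3, Bool.false_or]
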